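-- pv_equiv track=rewrite | github.com/stany-marshal/futurense-internship | My Work/Projects/minion game.py | vowel
-- ===== SOURCE A (Python) =====
-- def vowel(string):
--     index = 0
--     total = len(string)
--     sum = 0
--     for i in string:
--         if i in "AEIOU":
--             sum = sum + total -index
--         index += 1
--     return sum
-- ===== SOURCE B (Python) =====
-- def vowel(string):
--     count = 0
--     result = 0
--     for ch in string:
--         if ch in "AEIOU":
--             count += 1
--         result += count
--     return result
-- ===== Notes on version B (the rewrite author's own statement) =====
-- stated objective: simpler
-- what changed: Swaps the order of summation: instead of adding (len - index) at each vowel, B keeps a running count of vowels seen so far and adds that count to the result at every character, so no index or len() is needed.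
import Mathlib
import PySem

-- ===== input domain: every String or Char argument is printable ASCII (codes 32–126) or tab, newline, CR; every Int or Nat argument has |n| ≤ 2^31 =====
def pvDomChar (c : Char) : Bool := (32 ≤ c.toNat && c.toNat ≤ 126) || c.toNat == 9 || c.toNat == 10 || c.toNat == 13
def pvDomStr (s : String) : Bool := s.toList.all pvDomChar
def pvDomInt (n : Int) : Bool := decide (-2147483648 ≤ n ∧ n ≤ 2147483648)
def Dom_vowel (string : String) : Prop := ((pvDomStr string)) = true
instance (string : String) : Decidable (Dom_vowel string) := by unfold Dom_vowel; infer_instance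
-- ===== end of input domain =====

-- B replaces A's index-and-subtract at each vowel by a running vowel count added at every character (simpler: no index/len).

-- ===== PORT A =====
-- 'i in "AEIOU"' : membership of a char in the literal string
def vowelChar (c : Char) : Bool := "AEIOU".toList.contains c

-- loop state (index, sum); total fixed
def vowelLoopA (total : Int) : List Char → Int → Int → Int
  | [], _, s => s
  | c :: rest, idx, s =>
      vowelLoopA total rest (idx + 1) (if vowelChar c then s + total - idx else s)

def vowel (string : String) : Int :=
  vowelLoopA (string.toList.length : Int) string.toList 0 0

-- ===== PORT B =====
-- loop state (count, result)
def vowelLoopB : List Char → Int → Int → Int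
  | [], _, res => res
  | c :: rest, cnt, res =>
      let cnt' := if vowelChar c then cnt + 1 else cnt
      vowelLoopB rest cnt' (res + cnt')

def vowel_alt (string : String) : Int := vowelLoopB string.toList 0 0

-- ===== PRECONDITION & SPEC =====
def Spec_vowel (string : String) (out : Int) : Prop := out = vowel_alt string
instance (string : String) (out : Int) : Decidable (Spec_vowel string out) := by unfold Spec_vowel; infer_instance

-- ===== CLAIM (what is proved, stated in full; the proofs are below) =====
def Claim_equal_vowel : Prop := ∀ (string : String), Dom_vowel string → Spec_vowel string (vowel string)

-- ===== LEMMAS AND PROOFS =====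

-- B's loop is affine in its starting count: a starting count cnt contributes cnt on each of the l.length steps.
theorem vowelLoopB_lin (l : List Char) : ∀ (cnt res : Int),
    vowelLoopB l cnt res = res + cnt * l.length + vowelLoopB l 0 0 := by
  induction l with
  | nil => intro cnt res; simp [vowelLoopB]
  | cons c rest ih =>
    intro cnt res
    cases hv : vowelChar c <;>
      simp only [vowelLoopB, hv, List.length_cons, Bool.false_eq_true, if_true, if_false, zero_add] <;>
      [rw [ih cnt, ih 0]; rw [ih (cnt + 1), ih 1]] <;> push_cast <;> ring

-- A's loop equals B's loop from the zero state whenever total - idx is the remaining length.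
theorem loopA_eq_loopB (l : List Char) : ∀ (total idx s : Int),
    total - idx = (l.length : Int) →
    vowelLoopA total l idx s = s + vowelLoopB l 0 0 := by
  induction l with
  | nil => intro total idx s _; simp [vowelLoopA, vowelLoopB]
  | cons c rest ih =>
    intro total idx s h
    simp only [List.length_cons] at h
    push_cast at h
    simp only [vowelLoopA, vowelLoopB]
    rw [ih total (idx + 1) _ (by omega)]
    cases hv : vowelChar c
    · simp only [Bool.false_eq_true, if_false, zero_add]
    · simp only [if_true, zero_add]
      rw [vowelLoopB_lin rest 1 1, one_mul]
      omega

-- ===== VERDICT (by name: the statement is the Claim_ definition above) =====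
theorem vowel_spec : Claim_equal_vowel := by
  intro s _
  unfold Spec_vowel vowel vowel_alt
  rw [loopA_eq_loopB _ _ _ _ (by omega), zero_add]
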